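-- pv_equiv track=rewrite | github.com/ofer-kimchi/homotypic | code_for_upload.py | designAllComplementsRNARNA
-- ===== SOURCE A (Python) =====
-- def designAllComplementsRNARNA(seq):
--     # Take an RNA sequence and design all of its reverse complements as RNA sequences
--     complements = ['']
--     for nt in seq:
--         if nt == 'A':
--             complements = ['U' + comp for comp in complements]
--         elif nt == 'C':
--             complements = ['G' + comp for comp in complements]
--         elif nt == 'G':
--             complements *= 2
--             num_comp = len(complements)
--             complements = (['C' + comp for comp in complements[:int(num_comp/2)]] +
--                            ['U' + comp for comp in complements[int(num_comp/2):]])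
--         elif nt == 'U':
--             complements *= 2
--             num_comp = len(complements)
--             complements = (['A' + comp for comp in complements[:int(num_comp/2)]] +
--                            ['G' + comp for comp in complements[int(num_comp/2):]])
--     return(complements)
-- ===== SOURCE B (Python) =====
-- import itertools
--
-- _WOBBLE = {'A': ['U'], 'C': ['G'], 'G': ['C', 'U'], 'U': ['A', 'G']}
--
-- def designAllComplementsRNARNA(seq):
--     # Per-position choice table over the reversed sequence, then one cartesian product.
--     choices = [_WOBBLE.get(nt, ['']) for nt in reversed(seq)]
--     return [''.join(p) for p in itertools.product(*choices)]
-- ===== Notes on version B (the rewrite author's own statement) =====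
-- stated objective: idiomatic
-- what changed: Replaces A's per-nucleotide branch that rebuilds (and for G/U duplicates and slices) the growing list on each character by a precomputed per-position complement-choice table over the reversed sequence combined with a single itertools.product + join.
import Mathlib
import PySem

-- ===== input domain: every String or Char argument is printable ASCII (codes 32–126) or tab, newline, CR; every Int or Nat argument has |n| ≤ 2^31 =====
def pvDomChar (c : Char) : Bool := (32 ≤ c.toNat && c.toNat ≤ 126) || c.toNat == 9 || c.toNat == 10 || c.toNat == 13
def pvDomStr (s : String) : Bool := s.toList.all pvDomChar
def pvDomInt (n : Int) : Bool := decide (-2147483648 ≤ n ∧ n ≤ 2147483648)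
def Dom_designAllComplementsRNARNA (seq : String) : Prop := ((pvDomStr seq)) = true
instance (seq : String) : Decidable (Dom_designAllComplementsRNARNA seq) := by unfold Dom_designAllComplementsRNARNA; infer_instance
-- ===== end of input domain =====

-- B replaces A's branch-per-nucleotide list rebuilding by a per-position choice table over the
-- reversed sequence plus one cartesian product (itertools.product); objective: idiomatic.


-- ===== PORT A =====
-- Python strings are carried as List Char (PySem convention); the result is rebuilt with
-- String.ofList at the end. One loop iteration of A, branch for branch:
def pvStepA (complements : List (List Char)) (nt : Char) : List (List Char) :=
  if nt = 'A' then complements.map (fun comp => 'U' :: comp)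
  else if nt = 'C' then complements.map (fun comp => 'G' :: comp)
  else if nt = 'G' then
    -- complements *= 2; int(num_comp/2) is trunc division (PySem.Int.truncdiv); slices xs[:k], xs[k:]
    let c2 := complements ++ complements
    let numComp : Int := PySem.List.len c2
    (PySem.List.slice c2 none (some (PySem.Int.truncdiv numComp 2))).map (fun comp => 'C' :: comp) ++
    (PySem.List.slice c2 (some (PySem.Int.truncdiv numComp 2)) none).map (fun comp => 'U' :: comp)
  else if nt = 'U' then
    let c2 := complements ++ complements
    let numComp : Int := PySem.List.len c2
    (PySem.List.slice c2 none (some (PySem.Int.truncdiv numComp 2))).map (fun comp => 'A' :: comp) ++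
    (PySem.List.slice c2 (some (PySem.Int.truncdiv numComp 2)) none).map (fun comp => 'G' :: comp)
  else complements

def designAllComplementsRNARNA (seq : String) : List String :=
  ((seq.toList.foldl pvStepA [[]]).map (fun cs => String.ofList cs))

-- ===== PORT B =====
-- the _WOBBLE table; .get default [''] is [[]] in List-Char form
def pvChoice (nt : Char) : List (List Char) :=
  if nt = 'A' then [['U']]
  else if nt = 'C' then [['G']]
  else if nt = 'G' then [['C'], ['U']]
  else if nt = 'U' then [['A'], ['G']]
  else [[]]

-- itertools.product: last factor varies fastest; ''.join is list concatenation
def pvProduct : List (List (List Char)) → List (List Char)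
  | [] => [[]]
  | cs :: rest => cs.flatMap (fun x => (pvProduct rest).map (fun p => x ++ p))

def designAllComplementsRNARNA_alt (seq : String) : List String :=
  (pvProduct (seq.toList.reverse.map pvChoice)).map (fun cs => String.ofList cs)

-- ===== PRECONDITION & SPEC =====
def Spec_designAllComplementsRNARNA (seq : String) (out : List String) : Prop := out = designAllComplementsRNARNA_alt seq
instance (seq : String) (out : List String) : Decidable (Spec_designAllComplementsRNARNA seq out) := by unfold Spec_designAllComplementsRNARNA; infer_instance

-- ===== CLAIM (what is proved, stated in full; the proofs are below) =====
def Claim_equal_designAllComplementsRNARNA : Prop := ∀ (seq : String), Dom_designAllComplementsRNARNA seq → Spec_designAllComplementsRNARNA seq (designAllComplementsRNARNA seq)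

-- ===== LEMMAS AND PROOFS =====

-- one iteration of A's loop is exactly "prepend each choice of this nucleotide"
theorem pvStepA_eq_flatMap (L : List (List Char)) (nt : Char) :
    pvStepA L nt = (pvChoice nt).flatMap (fun x => L.map (fun p => x ++ p)) := by
  unfold pvStepA pvChoice
  have hlen : PySem.List.len (L ++ L) = ((2 * L.length : Nat) : Int) := by
    simp [PySem.List.len_eq, two_mul]
  have htd : PySem.Int.truncdiv ((2 * L.length : Nat) : Int) 2 = ((L.length : Nat) : Int) := by
    simp [PySem.Int.truncdiv]
  have hslice1 : PySem.List.slice (L ++ L) none (some ((L.length : Nat) : Int)) = L := by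
    rw [PySem.List.slice_to_natCast]; exact List.take_left ..
  have hslice2 : PySem.List.slice (L ++ L) (some ((L.length : Nat) : Int)) none = L := by
    rw [PySem.List.slice_from_natCast]; exact List.drop_left ..
  split_ifs <;>
    simp_all [List.flatMap_cons]

theorem pvFold_eq_product (l : List Char) :
    l.foldl pvStepA [[]] = pvProduct (l.reverse.map pvChoice) := by
  induction l using List.reverseRecOn with
  | nil => simp [pvProduct]
  | append_singleton l c ih =>
    rw [List.foldl_append, List.foldl_cons, List.foldl_nil, ih,
        List.reverse_append, List.reverse_singleton, List.singleton_append,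
        List.map_cons, pvStepA_eq_flatMap]
    rfl

-- ===== VERDICT (by name: the statement is the Claim_ definition above) =====
theorem designAllComplementsRNARNA_spec : Claim_equal_designAllComplementsRNARNA := by
  intro seq _
  unfold Spec_designAllComplementsRNARNA designAllComplementsRNARNA designAllComplementsRNARNA_alt
  rw [pvFold_eq_product]
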